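-- pv_equiv track=rewrite | github.com/wanshushan/TG | RD/doctor_face/face_doc.py | _find_best_ollama_model
-- ===== SOURCE A (Python) =====
-- def _find_best_ollama_model(requested_model: str, candidates: list[str]) -> str | None:
-- 	if not requested_model or not candidates:
-- 		return None
-- 	requested_lower = requested_model.lower()
--
-- 	exact = next((item for item in candidates if item.lower() == requested_lower), None)
-- 	if exact:
-- 		return exact
--
-- 	prefix = next((item for item in candidates if item.lower().startswith(requested_lower)), None)
-- 	if prefix:
-- 		return prefix
--
-- 	family = requested_lower.split(":")[0]
-- 	family_match = next((item for item in candidates if item.lower().startswith(f"{family}:")), None)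
-- 	if family_match:
-- 		return family_match
--
-- 	return None
-- ===== SOURCE B (Python) =====
-- def _find_best_ollama_model(requested_model: str, candidates: list[str]) -> str | None:
-- 	if not requested_model or not candidates:
-- 		return None
-- 	requested_lower = requested_model.lower()
-- 	family_prefix = requested_lower.split(":")[0] + ":"
--
-- 	best = None  # (rank, item); lower rank wins, first occurrence kept on ties
-- 	for item in candidates:
-- 		low = item.lower()
-- 		if low == requested_lower:
-- 			return item  # rank 0: exact match, nothing can beat it
-- 		if low.startswith(requested_lower):
-- 			rank = 1
-- 		elif low.startswith(family_prefix):
-- 			rank = 2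
-- 		else:
-- 			continue
-- 		if best is None or rank < best[0]:
-- 			best = (rank, item)
-- 	return best[1] if best is not None else None
-- ===== Notes on version B (the rewrite author's own statement) =====
-- stated objective: faster
-- what changed: Replaced A's three sequential next(...) scans over candidates with a single pass that ranks each candidate (0 exact / 1 prefix / 2 family), keeps the first best-ranked item, and returns early on an exact match.
import Mathlib
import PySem

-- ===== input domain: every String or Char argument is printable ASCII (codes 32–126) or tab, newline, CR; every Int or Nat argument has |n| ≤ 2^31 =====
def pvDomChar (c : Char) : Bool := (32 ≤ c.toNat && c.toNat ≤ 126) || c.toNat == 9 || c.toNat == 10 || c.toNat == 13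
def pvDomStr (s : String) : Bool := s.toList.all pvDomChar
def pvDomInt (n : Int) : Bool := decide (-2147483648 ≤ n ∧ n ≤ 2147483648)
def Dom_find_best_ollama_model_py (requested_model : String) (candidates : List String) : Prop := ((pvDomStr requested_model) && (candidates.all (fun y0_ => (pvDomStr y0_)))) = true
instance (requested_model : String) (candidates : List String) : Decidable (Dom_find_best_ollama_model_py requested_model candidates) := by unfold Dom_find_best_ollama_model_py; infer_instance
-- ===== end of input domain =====

-- B replaces A's three sequential next(...) scans by a single ranked pass over the
-- candidates (alternative decomposition, same return value).


-- ===== PORT A =====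
def find_best_ollama_model_py (requested_model : String) (candidates : List String) : Option String :=
  if requested_model = "" || candidates = [] then none
  else
    let requested_lower := PySem.Str.lower requested_model
    let exact := candidates.find? (fun item => PySem.Str.lower item == requested_lower)
    -- `if exact:` — Python truthiness: None and "" are falsy
    if exact.getD "" ≠ "" then exact
    else
      let prefixM := candidates.find? (fun item => PySem.Str.startswith (PySem.Str.lower item) requested_lower)
      if prefixM.getD "" ≠ "" then prefixM
      else
        let family := ((PySem.Str.split? requested_lower ":").getD []).headD ""
        let family_match := candidates.find? (fun item => PySem.Str.startswith (PySem.Str.lower item) (family ++ ":"))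
        if family_match.getD "" ≠ "" then family_match
        else none

-- ===== PORT B =====
-- rank of one candidate's lowercase form (exact-match rank 0 handled by the early return in the loop)
def fbRank (requested_lower family_prefix low : String) : Option Nat :=
  if PySem.Str.startswith low requested_lower then some 1
  else if PySem.Str.startswith low family_prefix then some 2
  else none

-- the single pass: keep the best (lowest-rank, first-encountered) item so far
def fbLoop (requested_lower family_prefix : String) (xs : List String) (best : Option (Nat × String)) : Option String :=
  match xs with
  | [] => best.map (·.2)
  | item :: rest =>
    let low := PySem.Str.lower item
    if low == requested_lower then some item
    else
      match fbRank requested_lower family_prefix low with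
      | none => fbLoop requested_lower family_prefix rest best
      | some rank =>
        match best with
        | none => fbLoop requested_lower family_prefix rest (some (rank, item))
        | some (rb, b) =>
          if rank < rb then fbLoop requested_lower family_prefix rest (some (rank, item))
          else fbLoop requested_lower family_prefix rest (some (rb, b))

def find_best_ollama_model_py_alt (requested_model : String) (candidates : List String) : Option String :=
  if requested_model = "" || candidates = [] then none
  else
    let requested_lower := PySem.Str.lower requested_model
    let family_prefix := ((PySem.Str.split? requested_lower ":").getD []).headD "" ++ ":"
    fbLoop requested_lower family_prefix candidates none

-- ===== PRECONDITION & SPEC =====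
def Spec_find_best_ollama_model_py (requested_model : String) (candidates : List String) (out : Option String) : Prop := out = find_best_ollama_model_py_alt requested_model candidates
instance (requested_model : String) (candidates : List String) (out : Option String) : Decidable (Spec_find_best_ollama_model_py requested_model candidates out) := by unfold Spec_find_best_ollama_model_py; infer_instance

-- ===== CLAIM (what is proved, stated in full; the proofs are below) =====
def Claim_equal_find_best_ollama_model_py : Prop := ∀ (requested_model : String) (candidates : List String), Dom_find_best_ollama_model_py requested_model candidates → Spec_find_best_ollama_model_py requested_model candidates (find_best_ollama_model_py requested_model candidates)

-- ===== LEMMAS AND PROOFS =====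

theorem pv_lower_eq_empty {s : String} (h : PySem.Str.lower s = "") : s = "" := by
  have hl : (PySem.Str.lower s).toList.length = s.toList.length := by
    simp [PySem.Chars.lower]
  rw [h] at hl
  exact String.toList_eq_nil_iff.mp (List.length_eq_zero_iff.mp (by simpa using hl.symm))

theorem pv_startswith_empty {p : String} (h : p ≠ "") : PySem.Str.startswith "" p = false := by
  rw [Bool.eq_false_iff]
  intro hc
  simp only [PySem.Str.startswith_eq] at hc
  rw [PySem.Chars.startswith_iff] at hc
  simp at hc
  exact h (by cases p; simp_all)

theorem fbLoop_one (rl fp b : String) (xs : List String) :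
    fbLoop rl fp xs (some (1, b)) =
      match xs.find? (fun x => PySem.Str.lower x == rl) with
      | some e => some e
      | none => some b := by
  induction xs with
  | nil => simp [fbLoop]
  | cons x xs ih =>
    by_cases h1 : PySem.Str.lower x == rl
    · simp [fbLoop, h1, List.find?]
    · by_cases h2 : PySem.Chars.startswith (PySem.Chars.lower x.toList) rl.toList
      · simpa [fbLoop, fbRank, h1, h2, List.find?] using ih
      · by_cases h3 : PySem.Chars.startswith (PySem.Chars.lower x.toList) fp.toList
        · simpa [fbLoop, fbRank, h1, h2, h3, List.find?] using ih
        · simpa [fbLoop, fbRank, h1, h2, h3, List.find?] using ih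

theorem fbLoop_two (rl fp b : String) (xs : List String) :
    fbLoop rl fp xs (some (2, b)) =
      match xs.find? (fun x => PySem.Str.lower x == rl) with
      | some e => some e
      | none =>
        match xs.find? (fun x => PySem.Str.startswith (PySem.Str.lower x) rl) with
        | some p => some p
        | none => some b := by
  induction xs with
  | nil => simp [fbLoop]
  | cons x xs ih =>
    by_cases h1 : PySem.Str.lower x == rl
    · simp [fbLoop, h1, List.find?]
    · by_cases h2 : PySem.Chars.startswith (PySem.Chars.lower x.toList) rl.toList
      · simp [fbLoop, fbRank, h1, h2, List.find?, fbLoop_one]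
      · by_cases h3 : PySem.Chars.startswith (PySem.Chars.lower x.toList) fp.toList
        · simpa [fbLoop, fbRank, h1, h2, h3, List.find?] using ih
        · simpa [fbLoop, fbRank, h1, h2, h3, List.find?] using ih

theorem fbLoop_none (rl fp : String) (xs : List String) :
    fbLoop rl fp xs none =
      match xs.find? (fun x => PySem.Str.lower x == rl) with
      | some e => some e
      | none =>
        match xs.find? (fun x => PySem.Str.startswith (PySem.Str.lower x) rl) with
        | some p => some p
        | none => xs.find? (fun x => PySem.Str.startswith (PySem.Str.lower x) (fp)) := by
  induction xs with
  | nil => simp [fbLoop]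
  | cons x xs ih =>
    by_cases h1 : PySem.Str.lower x == rl
    · simp [fbLoop, h1, List.find?]
    · by_cases h2 : PySem.Chars.startswith (PySem.Chars.lower x.toList) rl.toList
      · simp [fbLoop, fbRank, h1, h2, List.find?, fbLoop_one]
      · by_cases h3 : PySem.Chars.startswith (PySem.Chars.lower x.toList) fp.toList
        · simp [fbLoop, fbRank, h1, h2, h3, List.find?, fbLoop_two]
        · simpa [fbLoop, fbRank, h1, h2, h3, List.find?] using ih

-- ===== VERDICT (by name: the statement is the Claim_ definition above) =====
theorem find_best_ollama_model_py_spec : Claim_equal_find_best_ollama_model_py := by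
  intro rm cands _dom
  unfold Spec_find_best_ollama_model_py find_best_ollama_model_py find_best_ollama_model_py_alt
  by_cases hg : rm = "" || cands = []
  · simp [hg]
  · simp only [hg, if_false]
    have hrm : rm ≠ "" := by
      intro h; apply (by simpa using hg : ¬(rm = "" ∨ cands = [])); exact Or.inl h
    set rl := PySem.Str.lower rm with hrl
    have hrlne : rl ≠ "" := fun h => hrm (pv_lower_eq_empty h)
    set fam := ((PySem.Str.split? rl ":").getD []).headD "" with hfam
    have hfpne : fam ++ ":" ≠ "" := by
      intro h
      have : (fam ++ ":").toList = "".toList := by rw [h]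
      simp at this
    rw [fbLoop_none]
    -- exact scan
    cases hE : cands.find? (fun x => PySem.Str.lower x == rl) with
    | some e =>
      have hpe : PySem.Str.lower e = rl := by simpa using List.find?_some hE
      have hene : e ≠ "" := by
        intro h; subst h
        exact hrlne (hpe.symm.trans (by decide))
      simp [hE, hene]
    | none =>
      simp only [hE, Option.getD_none, ne_eq, not_true_eq_false, if_false]
      -- prefix scan
      cases hP : cands.find? (fun x => PySem.Str.startswith (PySem.Str.lower x) rl) with
      | some p =>
        have hpp : PySem.Str.startswith (PySem.Str.lower p) rl = true := by
          simpa using List.find?_some hP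
        have hpne : p ≠ "" := by
          intro h; subst h
          rw [(by decide : PySem.Str.lower "" = ""), pv_startswith_empty hrlne] at hpp
          exact Bool.false_ne_true hpp
        simp [hP, hpne]
      | none =>
        simp only [hP, Option.getD_none, ne_eq, not_true_eq_false, if_false]
        -- family scan
        cases hF : cands.find? (fun x => PySem.Str.startswith (PySem.Str.lower x) (fam ++ ":")) with
        | some f =>
          have hpf : PySem.Str.startswith (PySem.Str.lower f) (fam ++ ":") = true := by
            simpa using List.find?_some hF
          have hfne : f ≠ "" := by
            intro h; subst h
            rw [(by decide : PySem.Str.lower "" = ""), pv_startswith_empty hfpne] at hpf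
            exact Bool.false_ne_true hpf
          simp [hF, hfne]
        | none => simp [hF]
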